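-- pv_equiv track=rewrite | github.com/niftools/pyffi | makensis.py | getfiledict
-- ===== SOURCE A (Python) =====
-- def getfiledict(stream):
--     """Get dictionary mapping each directory to a list of files."""
--     filedict = {}
--     for line in stream:
--         # remove EOL
--         line = line.rstrip()
--         # windows separators
--         line = line.replace('/', '\\')
--         # seperate file and path
--         idx = line.rfind('\\')
--         if idx == -1:
--             path = "."
--         else:
--             path = line[:idx]
--         filename = line[idx+1:]
--         # add it to the dictionary
--         if not path in filedict:
--             filedict[path] = []
--         filedict[path].append(filename)
--
--     return filedict
-- ===== SOURCE B (Python) =====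
-- def getfiledict(stream):
--     """Get dictionary mapping each directory to a list of files."""
--     def split(line):
--         line = line.rstrip().replace('/', '\\')
--         idx = line.rfind('\\')
--         return ("." if idx == -1 else line[:idx], line[idx + 1:])
--     pairs = [split(line) for line in stream]
--     return {path: [fn for p, fn in pairs if p == path]
--             for path in dict.fromkeys(p for p, _ in pairs)}
-- ===== Notes on version B (the rewrite author's own statement) =====
-- stated objective: alternative
-- what changed: B first maps the stream to a flat list of (path, filename) pairs, then builds the result by deduplicating the paths in first-occurrence order and collecting each path's filenames with a filter, instead of A's single pass that mutates a dict of lists line by line.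
import Mathlib
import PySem

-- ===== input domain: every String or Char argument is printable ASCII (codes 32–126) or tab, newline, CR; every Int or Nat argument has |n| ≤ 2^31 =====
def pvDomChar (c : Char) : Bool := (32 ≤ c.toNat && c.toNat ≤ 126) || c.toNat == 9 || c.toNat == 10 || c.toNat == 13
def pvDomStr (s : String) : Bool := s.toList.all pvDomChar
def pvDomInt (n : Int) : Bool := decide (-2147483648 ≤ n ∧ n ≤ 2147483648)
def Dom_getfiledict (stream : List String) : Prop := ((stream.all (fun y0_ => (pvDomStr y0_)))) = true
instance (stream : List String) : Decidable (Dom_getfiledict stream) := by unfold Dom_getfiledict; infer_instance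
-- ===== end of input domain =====

-- B builds the (path, filename) pairs in one comprehension, then groups them by a
-- dict comprehension over the deduplicated paths (alternative decomposition, same cost class).

-- ===== PORT A =====
def getfiledict (stream : List String) : List (String × List String) :=
  (stream.foldl
    (fun (filedict : PySem.Dict String (List String)) (line0 : String) =>
      let line := PySem.Str.rstrip line0
      let line := PySem.Str.replace line "/" "\\"
      let idx := PySem.Str.rfind line "\\"
      let path := if idx = -1 then "." else PySem.Str.slice line none (some idx)
      let filename := PySem.Str.slice line (some (idx + 1)) none
      let filedict := if ¬ filedict.contains path then filedict.insert path [] else filedict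
      filedict.modify path [] (fun fs => fs ++ [filename]))
    PySem.Dict.empty).items

-- ===== PORT B =====
def splitLineB (line0 : String) : String × String :=
  let line := PySem.Str.replace (PySem.Str.rstrip line0) "/" "\\"
  let idx := PySem.Str.rfind line "\\"
  ((if idx = -1 then "." else PySem.Str.slice line none (some idx)),
   PySem.Str.slice line (some (idx + 1)) none)

def getfiledict_alt (stream : List String) : List (String × List String) :=
  let pairs := stream.map splitLineB
  (PySem.List.dedup (pairs.map Prod.fst)).map
    (fun path => (path, ((pairs.filter (fun q => q.1 == path)).map Prod.snd)))

-- ===== PRECONDITION & SPEC =====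
def Spec_getfiledict (stream : List String) (out : List (String × List String)) : Prop := out = getfiledict_alt stream
instance (stream : List String) (out : List (String × List String)) : Decidable (Spec_getfiledict stream out) := by unfold Spec_getfiledict; infer_instance

-- ===== CLAIM (what is proved, stated in full; the proofs are below) =====
def Claim_equal_getfiledict : Prop := ∀ (stream : List String), Dom_getfiledict stream → Spec_getfiledict stream (getfiledict stream)

-- ===== LEMMAS AND PROOFS =====

-- A's "setdefault then append" body equals a single modify.
theorem stepA_eq (d : PySem.Dict String (List String)) (p : String) (f : String) :
    ((if ¬ d.contains p then d.insert p [] else d).modify p [] (fun fs => fs ++ [f]))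
      = d.modify p [] (fun fs => fs ++ [f]) := by
  by_cases h : d.contains p
  · simp [h]
  · simp only [h, Bool.not_eq_true, if_pos, PySem.Dict.modify,
      PySem.Dict.getD_insert_self, PySem.Dict.insert_insert_self]
    rw [PySem.Dict.getD_of_not_contains d [] (by simpa using h)]

-- the dict A builds, as a fold over the split pairs
theorem getfiledict_eq_fold (stream : List String) :
    getfiledict stream =
      ((stream.map splitLineB).foldl
        (fun d q => d.modify q.1 [] (fun fs => fs ++ [q.2])) PySem.Dict.empty).items := by
  unfold getfiledict
  rw [List.foldl_map]
  congr 1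
  apply List.foldl_ext
  intro d line _
  simpa [splitLineB] using stepA_eq d _ _

theorem group_items (pairs : List (String × String)) :
    ((pairs.foldl (fun d q => d.modify q.1 [] (fun fs => fs ++ [q.2]))
        (PySem.Dict.empty : PySem.Dict String (List String))).items)
      = (PySem.List.dedup (pairs.map Prod.fst)).map
          (fun path => (path, ((pairs.filter (fun q => q.1 == path)).map Prod.snd))) := by
  rw [PySem.Dict.items_eq_map_keys _ ?nd []]
  case nd =>
    exact PySem.Dict.nodup_keys_foldl_modify_key pairs Prod.fst _ _ _ PySem.Dict.nodup_keys_empty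
  rw [PySem.Dict.keys_foldl_modify_key]
  simp [PySem.Dict.keys_empty, PySem.Dict.getD_foldl_modify_append, PySem.Dict.getD_empty,
    PySem.Set.update, PySem.List.dedup_eq_ofList, PySem.Set.ofList_eq_foldl]

-- ===== VERDICT (by name: the statement is the Claim_ definition above) =====
theorem getfiledict_spec : Claim_equal_getfiledict := by
  intro stream _
  show getfiledict stream = getfiledict_alt stream
  rw [getfiledict_eq_fold, group_items]
  rfl
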